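-- pv_equiv track=rewrite | github.com/Mao-beta/AtCoder | tenkei90/tenkei90_082.py | solve
-- ===== SOURCE A (Python) =====
-- MOD = 10 ** 9 + 7
--
-- def solve(N):
--     # 0以上N以下について求める
--     K = len(str(N))
--     res = 0
--     for k in range(1, K+1):
--         if k != K:
--             # k==3なら100以上1000未満の900個の総和×k
--             l = 10**(k-1)
--             r = l * 10 - 1
--         else:
--             l = 10**(k-1)
--             r = N
--
--         n = (l + r) * (r - l + 1) // 2
--         res += n * k
--         res %= MOD
--
--     return res
-- ===== SOURCE B (Python) =====
-- MOD = 10 ** 9 + 7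
--
-- def solve(N):
--     # digitcount(n) = number of thresholds 10**(d-1) <= n, so instead of
--     # disjoint digit-length bands weighted by k, sum the overlapping
--     # suffix ranges [10**(d-1) .. N] once each: no branch, no weight.
--     K = len(str(N))
--     res = 0
--     for d in range(1, K + 1):
--         lower = 10 ** (d - 1)
--         res += (lower + N) * (N - lower + 1) // 2
--         res %= MOD
--     return res
-- ===== Notes on version B (the rewrite author's own statement) =====
-- stated objective: simpler
-- what changed: Instead of summing disjoint digit-length bands each weighted by its digit count k (with an if-branch for the last band), B sums the overlapping suffix ranges [10^(d-1)..N] once each, using that digitcount(n) is the number of thresholds 10^(d-1) <= n; no branch and no multiplication by k.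
import Mathlib
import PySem

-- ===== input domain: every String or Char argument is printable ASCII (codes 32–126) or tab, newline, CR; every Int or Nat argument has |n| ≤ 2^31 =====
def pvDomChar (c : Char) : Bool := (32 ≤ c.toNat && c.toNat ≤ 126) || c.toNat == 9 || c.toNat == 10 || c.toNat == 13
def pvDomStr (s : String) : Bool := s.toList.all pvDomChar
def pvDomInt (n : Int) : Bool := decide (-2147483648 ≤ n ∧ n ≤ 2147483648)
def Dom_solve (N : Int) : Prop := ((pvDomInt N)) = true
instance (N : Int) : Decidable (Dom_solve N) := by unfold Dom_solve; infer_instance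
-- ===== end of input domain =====

-- B replaces A's disjoint digit-length bands weighted by the digit count (with an
-- if-branch for the last band) by an unweighted, branch-free sum of the overlapping
-- suffix ranges [10^(d-1)..N]; same cost, simpler loop body.

def pvMOD : Int := 10 ^ 9 + 7

-- ===== PORT A =====
-- 10 ** (k-1): the loop variable k comes from range(1, K+1), so k-1 ≥ 0 and
-- (k-1).toNat is exact for Python's integer power.
def solve (N : Int) : Int :=
  let K : Int := PySem.Str.len (PySem.Int.toStr N)
  (PySem.List.pyRange 1 (K + 1) 1).foldl
    (fun res k =>
      let lr : Int × Int :=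
        if k ≠ K then
          let l : Int := 10 ^ (k - 1).toNat
          (l, l * 10 - 1)
        else
          (10 ^ (k - 1).toNat, N)
      let n : Int := PySem.Int.floordiv ((lr.1 + lr.2) * (lr.2 - lr.1 + 1)) 2
      PySem.Int.mod (res + n * k) pvMOD) 0

-- ===== PORT B =====
-- 10 ** (d-1): d comes from range(1, K+1), so d-1 ≥ 0 and (d-1).toNat is exact.
def solve_alt (N : Int) : Int :=
  let K : Int := PySem.Str.len (PySem.Int.toStr N)
  (PySem.List.pyRange 1 (K + 1) 1).foldl
    (fun res d =>
      let lower : Int := 10 ^ (d - 1).toNat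
      PySem.Int.mod (res + PySem.Int.floordiv ((lower + N) * (N - lower + 1)) 2) pvMOD) 0

-- ===== PRECONDITION & SPEC =====
def Spec_solve (N : Int) (out : Int) : Prop := out = solve_alt N
instance (N : Int) (out : Int) : Decidable (Spec_solve N out) := by unfold Spec_solve; infer_instance

-- ===== CLAIM (what is proved, stated in full; the proofs are below) =====
def Claim_equal_solve : Prop := ∀ (N : Int), Dom_solve N → Spec_solve N (solve N)

-- ===== LEMMAS AND PROOFS =====

-- folding res = (res + f k) % MOD over a list is (r + Σ f) % MOD
theorem pv_foldl_mod {α : Type} (f : α → Int) :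
    ∀ (l : List α) (r : Int),
      l.foldl (fun res k => PySem.Int.mod (res + f k) pvMOD) (PySem.Int.mod r pvMOD)
        = PySem.Int.mod (r + (l.map f).sum) pvMOD := by
  intro l
  induction l with
  | nil => intro r; simp
  | cons k ks ih =>
    intro r
    have hM : (0:Int) < pvMOD := by norm_num [pvMOD]
    simp only [List.foldl_cons, List.map_cons, List.sum_cons]
    have h1 : PySem.Int.mod (PySem.Int.mod r pvMOD + f k) pvMOD
        = PySem.Int.mod (r + f k) pvMOD := by
      simp only [PySem.Int.mod_eq_emod_of_pos hM, Int.emod_add_emod]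
    rw [h1, ih (r + f k), add_assoc]

-- the Gauss numerator is exactly divisible by 2
theorem pv_two_mul_tri (a b : Int) :
    2 * PySem.Int.floordiv ((a + b) * (b - a + 1)) 2 = (a + b) * (b - a + 1) := by
  have hE : Even ((a + b) * (b - a + 1)) := by
    have h1 : Even (b * (b + 1)) := Int.even_mul_succ_self b
    have h2 : Even ((a - 1) * ((a - 1) + 1)) := Int.even_mul_succ_self (a - 1)
    have h3 : (a + b) * (b - a + 1) = b * (b + 1) - (a - 1) * ((a - 1) + 1) := by ring
    rw [h3]; exact h1.sub h2
  obtain ⟨c, hc⟩ := hE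
  rw [PySem.Int.floordiv_eq_ediv_of_pos (by norm_num), hc]
  omega

-- doubled A-terms / B-terms as polynomials, indexed by j = k - 1 : Nat
def pvG (x : Int) : Int := x * (x - 1)

def pvA2 (Kn : Nat) (N : Int) (j : Nat) : Int :=
  if j + 1 ≠ Kn then (pvG ((10 : Int) ^ j * 10) - pvG ((10 : Int) ^ j)) * (1 + (j : Int))
  else (pvG (N + 1) - pvG ((10 : Int) ^ j)) * (1 + (j : Int))

def pvB2 (N : Int) (j : Nat) : Int := pvG (N + 1) - pvG ((10 : Int) ^ j)

def pvFull (j : Nat) : Int := (pvG ((10 : Int) ^ j * 10) - pvG ((10 : Int) ^ j)) * (1 + (j : Int))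

-- Abel/telescoping sum of the full bands
theorem pv_tele (K : Nat) :
    ((List.range K).map pvFull).sum
      = (K : Int) * pvG ((10 : Int) ^ K)
        - ((List.range K).map (fun j => pvG ((10 : Int) ^ j))).sum := by
  induction K with
  | zero => simp
  | succ m ih =>
    rw [List.range_succ]
    simp only [List.map_append, List.sum_append, List.map_cons, List.map_nil,
      List.sum_cons, List.sum_nil, ih]
    rw [pvFull]
    push_cast
    rw [pow_succ]
    ring

theorem pv_sumB (N : Int) (K : Nat) :
    ((List.range K).map (pvB2 N)).sum
      = (K : Int) * pvG (N + 1) - ((List.range K).map (fun j => pvG ((10 : Int) ^ j))).sum := by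
  induction K with
  | zero => simp
  | succ m ih =>
    rw [List.range_succ]
    simp only [List.map_append, List.sum_append, List.map_cons, List.map_nil,
      List.sum_cons, List.sum_nil, ih, pvB2]
    push_cast
    ring

-- the doubled sums agree
theorem pv_key (Kn : Nat) (N : Int) :
    ((List.range Kn).map (pvA2 Kn N)).sum = ((List.range Kn).map (pvB2 N)).sum := by
  cases Kn with
  | zero => simp
  | succ m =>
    have hcongr : (List.range m).map (pvA2 (m+1) N) = (List.range m).map pvFull := by
      apply List.map_congr_left
      intro j hj
      have hlt : j < m := List.mem_range.mp hj
      have hne : ¬ j = m := by omega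
      simp [pvA2, pvFull, hne]
    rw [List.range_succ]
    simp only [List.map_append, List.sum_append, List.map_cons, List.map_nil,
      List.sum_cons, List.sum_nil, hcongr, pv_tele, pv_sumB]
    have hlast : pvA2 (m+1) N m = (pvG (N + 1) - pvG ((10 : Int) ^ m)) * (1 + (m : Int)) := by
      simp [pvA2]
    rw [hlast, pvB2]
    ring

theorem pv_solve_eq (N : Int) : solve N = solve_alt N := by
  unfold solve solve_alt
  simp only [PySem.Str.len_eq]
  set Kn := (PySem.Int.toStr N).toList.length with hKn
  rw [PySem.List.pyRange_one]
  have h1 : (((Kn:Int)+1) - 1).toNat = Kn := by omega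
  rw [h1]
  have h0 : (0:Int) = PySem.Int.mod 0 pvMOD := by
    rw [PySem.Int.mod_eq_emod_of_pos (by norm_num [pvMOD])]; simp
  simp only [List.foldl_map]
  rw [h0, pv_foldl_mod, pv_foldl_mod]
  congr 1
  rw [zero_add, zero_add]
  -- cancel the factor 2 and compare the doubled polynomial terms
  apply mul_left_cancel₀ (two_ne_zero (α := Int))
  rw [← List.sum_map_mul_left, ← List.sum_map_mul_left]
  have hA : (List.range Kn).map
      (fun (j : Nat) => 2 * (PySem.Int.floordiv
        (((if (1 + (j:Int)) ≠ (Kn:Int) then ((10:Int) ^ ((1 + (j:Int)) - 1).toNat, 10 ^ ((1 + (j:Int)) - 1).toNat * 10 - 1)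
            else (10 ^ ((1 + (j:Int)) - 1).toNat, N)).1 +
          (if (1 + (j:Int)) ≠ (Kn:Int) then ((10:Int) ^ ((1 + (j:Int)) - 1).toNat, 10 ^ ((1 + (j:Int)) - 1).toNat * 10 - 1)
            else (10 ^ ((1 + (j:Int)) - 1).toNat, N)).2) *
          ((if (1 + (j:Int)) ≠ (Kn:Int) then ((10:Int) ^ ((1 + (j:Int)) - 1).toNat, 10 ^ ((1 + (j:Int)) - 1).toNat * 10 - 1)
            else (10 ^ ((1 + (j:Int)) - 1).toNat, N)).2 -
          (if (1 + (j:Int)) ≠ (Kn:Int) then ((10:Int) ^ ((1 + (j:Int)) - 1).toNat, 10 ^ ((1 + (j:Int)) - 1).toNat * 10 - 1)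
            else (10 ^ ((1 + (j:Int)) - 1).toNat, N)).1 + 1)) 2 * (1 + (j:Int))))
      = (List.range Kn).map (pvA2 Kn N) := by
    apply List.map_congr_left
    intro j hj
    have hjt : ((1 + (j:Int)) - 1).toNat = j := by omega
    rw [hjt]
    by_cases hc : j + 1 = Kn
    · have hcc : ¬ ((1 + (j:Int)) ≠ (Kn:Int)) := by omega
      rw [if_neg hcc]
      simp only [pvA2, if_neg (show ¬ j + 1 ≠ Kn from not_not_intro hc), pvG]
      have h2 := pv_two_mul_tri ((10:Int) ^ j) N
      linear_combination (1 + (j:Int)) * h2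
    · have hcc : ((1 + (j:Int)) ≠ (Kn:Int)) := by omega
      rw [if_pos hcc]
      simp only [pvA2, if_pos (show j + 1 ≠ Kn from hc), pvG]
      have h2 := pv_two_mul_tri ((10:Int) ^ j) ((10:Int) ^ j * 10 - 1)
      linear_combination (1 + (j:Int)) * h2
  have hB : (List.range Kn).map
      (fun (j : Nat) => 2 * PySem.Int.floordiv (((10:Int) ^ ((1 + (j:Int)) - 1).toNat + N) * (N - (10:Int) ^ ((1 + (j:Int)) - 1).toNat + 1)) 2)
      = (List.range Kn).map (pvB2 N) := by
    apply List.map_congr_left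
    intro j hj
    have hjt : ((1 + (j:Int)) - 1).toNat = j := by omega
    rw [hjt]
    simp only [pvB2, pvG]
    have h2 := pv_two_mul_tri ((10:Int) ^ j) N
    linear_combination h2
  rw [hA, hB, pv_key]

-- ===== VERDICT (by name: the statement is the Claim_ definition above) =====
theorem solve_spec : Claim_equal_solve := by
  intro N _
  show solve N = solve_alt N
  exact pv_solve_eq N
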